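-- pv_equiv track=rewrite | github.com/Leivaaaluca/Parcial.Progra.Recu.1.Parcial | Funcionescorrex.py | jurado_mas_estricto
-- ===== SOURCE A (Python) =====
-- def jurado_mas_estricto(promedios: list) -> int:
--     """Devuelve la info del jurado mas estricto"""
--     indice = 0
--     menor = promedios[0]
--     for i in range(1, len(promedios)):
--         if promedios[i] < menor:
--             menor = promedios[i]
--             indice = i
--
--     return indice
-- ===== SOURCE B (Python) =====
-- def jurado_mas_estricto(promedios: list) -> int:
--     """Devuelve la info del jurado mas estricto"""
--     menor = min(promedios)
--     return promedios.index(menor)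
-- ===== Notes on version B (the rewrite author's own statement) =====
-- stated objective: idiomatic
-- what changed: Replaces the explicit single-pass argmin loop over indices with a two-pass min(promedios) followed by promedios.index(...), which gives the same first-occurrence index; on the empty list A raises IndexError while B raises ValueError, so Pre_ excludes it.
import Mathlib
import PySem

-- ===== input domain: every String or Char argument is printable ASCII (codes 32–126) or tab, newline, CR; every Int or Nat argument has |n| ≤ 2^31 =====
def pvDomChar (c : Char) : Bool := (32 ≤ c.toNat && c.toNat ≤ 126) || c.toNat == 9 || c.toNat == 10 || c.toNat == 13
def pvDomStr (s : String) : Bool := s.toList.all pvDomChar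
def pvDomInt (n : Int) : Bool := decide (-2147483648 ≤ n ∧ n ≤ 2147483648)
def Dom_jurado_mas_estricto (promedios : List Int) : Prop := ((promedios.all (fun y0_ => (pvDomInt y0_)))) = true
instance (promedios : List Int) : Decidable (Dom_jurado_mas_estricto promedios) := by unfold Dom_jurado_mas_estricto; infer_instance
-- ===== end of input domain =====

-- B replaces A's single explicit argmin loop by min(promedios) followed by promedios.index(...): same first-occurrence result, more idiomatic.

-- ===== PORT A =====
-- loop body: 'if promedios[i] < menor: menor = promedios[i]; indice = i' over state (indice, menor)
def jmeStep (promedios : List Int) (s : Int × Int) (i : Int) : Int × Int :=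
  if PySem.List.pyGetD promedios i 0 < s.2 then (i, PySem.List.pyGetD promedios i 0) else s

def jurado_mas_estricto (promedios : List Int) : Int :=
  ((PySem.List.pyRange 1 (PySem.List.len promedios) 1).foldl (jmeStep promedios)
    (0, PySem.List.pyGetD promedios 0 0)).1

-- ===== PORT B =====
def jurado_mas_estricto_alt (promedios : List Int) : Int :=
  let menor := (PySem.List.min? promedios (fun x => x)).getD 0
  (((PySem.List.index? promedios menor).getD 0 : Nat) : Int)

-- ===== PRECONDITION & SPEC =====
-- Pre_ excludes only the empty list, on which A raises IndexError (and B raises ValueError).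
def Pre_jurado_mas_estricto (promedios : List Int) : Prop := promedios ≠ []
instance (promedios : List Int) : Decidable (Pre_jurado_mas_estricto promedios) := by unfold Pre_jurado_mas_estricto; infer_instance
def pvWitness_jurado_mas_estricto : List Int := [5, 3, 3, 7]

def Spec_jurado_mas_estricto (promedios : List Int) (out : Int) : Prop := out = jurado_mas_estricto_alt promedios
instance (promedios : List Int) (out : Int) : Decidable (Spec_jurado_mas_estricto promedios out) := by unfold Spec_jurado_mas_estricto; infer_instance

-- ===== CLAIM (what is proved, stated in full; the proofs are below) =====
def Claim_equal_jurado_mas_estricto : Prop := ∀ (promedios : List Int), Dom_jurado_mas_estricto promedios → Pre_jurado_mas_estricto promedios → Spec_jurado_mas_estricto promedios (jurado_mas_estricto promedios)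

-- ===== LEMMAS AND PROOFS =====

-- Invariant of A's loop: after processing indices 1..k, the state (indice, menor) is a
-- minimum of the first k+1 elements together with its first index.
theorem jme_inv (x : Int) (t : List Int) (k : Nat) (hk : k ≤ t.length) :
    (((PySem.List.pyRange 1 (1 + (k : Int)) 1).foldl (jmeStep (x :: t)) (0, x)).2 ∈ x :: t.take k) ∧
    (∀ y ∈ x :: t.take k, ((PySem.List.pyRange 1 (1 + (k : Int)) 1).foldl (jmeStep (x :: t)) (0, x)).2 ≤ y) ∧
    (PySem.List.index? (x :: t.take k) ((PySem.List.pyRange 1 (1 + (k : Int)) 1).foldl (jmeStep (x :: t)) (0, x)).2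
      = some ((PySem.List.pyRange 1 (1 + (k : Int)) 1).foldl (jmeStep (x :: t)) (0, x)).1.toNat) ∧
    (0 ≤ ((PySem.List.pyRange 1 (1 + (k : Int)) 1).foldl (jmeStep (x :: t)) (0, x)).1) := by
  induction k with
  | zero =>
      simp
  | succ k ih =>
      have hk' : k ≤ t.length := by omega
      obtain ⟨hmem, hmin, hidx, hpos⟩ := ih hk'
      have hrange : PySem.List.pyRange 1 (1 + ((k+1 : Nat) : Int)) 1
          = PySem.List.pyRange 1 (1 + (k : Int)) 1 ++ [1 + (k : Int)] := by
        have := PySem.List.pyRange_one_succ_right (a := 1) (b := 1 + (k : Int)) (by omega)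
        rw [show (1 + ((k+1 : Nat) : Int)) = (1 + (k : Int)) + 1 by push_cast; ring]
        exact this
      have hklt : k < t.length := by omega
      have hget : PySem.List.pyGetD (x :: t) (1 + (k : Int)) 0 = t[k] := by
        rw [show (1 + (k : Int)) = ((k+1 : Nat) : Int) by push_cast; ring,
            PySem.List.pyGetD_natCast]
        simp [List.getD, hklt]
      have htake : t.take (k+1) = t.take k ++ [t[k]] := by
        rw [List.take_add_one]
        simp [hklt]
      have hcons : x :: t.take (k+1) = (x :: t.take k) ++ [t[k]] := by
        rw [htake]; rfl
      rw [hrange, List.foldl_append]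
      set s := (PySem.List.pyRange 1 (1 + (k : Int)) 1).foldl (jmeStep (x :: t)) (0, x) with hs
      simp only [List.foldl_cons, List.foldl_nil]
      rw [hcons]
      by_cases hlt : t[k] < s.2
      · -- new minimum found at index 1+k
        have hstep : jmeStep (x :: t) s (1 + (k : Int)) = (1 + (k : Int), t[k]) := by
          simp [jmeStep, hget, hlt]
        rw [hstep]
        have hnotmem : t[k] ∉ x :: t.take k := fun h => absurd (hmin _ h) (by omega)
        refine ⟨?_, ?_, ?_, ?_⟩
        · exact List.mem_append_right _ (List.mem_singleton_self _)
        · intro y hy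
          rcases List.mem_append.mp hy with h | h
          · exact le_trans (le_of_lt hlt) (hmin _ h)
          · simp at h; omega
        · show PySem.List.index? ((x :: t.take k) ++ [t[k]]) t[k] = some (1 + (k : Int)).toNat
          rw [PySem.List.index?_append_singleton_self _ _ hnotmem]
          congr 1
          simp [List.length_take, Nat.min_eq_left hk']
          omega
        · show (0 : Int) ≤ 1 + (k : Int)
          omega
      · -- state unchanged
        have hstep : jmeStep (x :: t) s (1 + (k : Int)) = s := by
          simp [jmeStep, hget, hlt]
        rw [hstep]
        refine ⟨List.mem_append.mpr (Or.inl hmem), ?_, ?_, hpos⟩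
        · intro y hy
          rcases List.mem_append.mp hy with h | h
          · exact hmin _ h
          · simp at h; subst h; omega
        · rw [PySem.List.index?_append_of_mem _ hmem]
          exact hidx

-- ===== VERDICT (by name: the statement is the Claim_ definition above) =====
theorem jurado_mas_estricto_spec : Claim_equal_jurado_mas_estricto := by
  intro promedios _ hpre
  match promedios, hpre with
  | x :: t, _ =>
    unfold Spec_jurado_mas_estricto jurado_mas_estricto jurado_mas_estricto_alt
    have hlen : PySem.List.len (x :: t) = 1 + (t.length : Int) := by
      simp [PySem.List.len_eq]; ring
    have hget0 : PySem.List.pyGetD (x :: t) 0 0 = x := PySem.List.pyGetD_zero_cons x t 0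
    rw [hlen, hget0]
    obtain ⟨hmem, hmin, hidx, hpos⟩ := jme_inv x t t.length le_rfl
    rw [List.take_length] at hmem hmin hidx
    set s := (PySem.List.pyRange 1 (1 + (t.length : Int)) 1).foldl (jmeStep (x :: t)) (0, x) with hs
    -- min? returns the first minimum; its value equals s.2
    obtain ⟨m, hm⟩ : ∃ m, PySem.List.min? (x :: t) (fun x => x) = some m := by
      cases h : PySem.List.min? (x :: t) (fun x => x) with
      | none => exact absurd ((PySem.List.min?_eq_none_iff _ _).mp h) (List.cons_ne_nil x t)
      | some m => exact ⟨m, rfl⟩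
    have hmmem := PySem.List.min?_mem hm
    have hmmin := PySem.List.min?_isMin hm
    have heqv : m = s.2 := le_antisymm (hmmin _ hmem) (hmin _ hmmem)
    rw [hm]
    simp only [Option.getD_some, heqv, hidx]
    simp [Int.toNat_of_nonneg hpos]
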